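-- pv_equiv track=rewrite | github.com/danila-matveev/Wookiee | services/sheets_sync/hub_to_sheets/anchor.py | build_anchor_index
-- ===== SOURCE A (Python) =====
-- from typing import Sequence
--
-- def _norm(value: str) -> str:
--     """Case-insensitive, trimmed comparison key. Empty strings become ''."""
--     return (value or "").strip().lower()
--
-- def build_anchor_index(
--     sheet_columns: Sequence[str],
--     sheet_rows: Sequence[Sequence[str]],
--     anchor_cols: Sequence[str],
--     header_row: int = 1,
-- ) -> dict[tuple[str, ...], int]:
--     """Return {anchor-tuple → 1-based row index} for rows in the sheet.
--
--     Args: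
--         sheet_columns: Header row values, in order. Must contain every name
--             in `anchor_cols` (KeyError otherwise).
--         sheet_rows: Data rows (header NOT included).
--         anchor_cols: Column names that compose the anchor key.
--         header_row: 1-based row number of the header in the actual sheet
--             (defaults to 1; the first data row is `header_row + 1`).
--
--     Empty anchors (all components blank) are skipped.
--     Duplicate anchors keep the FIRST occurrence; subsequent rows are ignored
--     so we never overwrite stable rows.
--     """
--     try:
--         anchor_indices = [sheet_columns.index(col) for col in anchor_cols]
--     except ValueError as exc:
--         raise KeyError(f"Anchor column missing in sheet header: {exc}") from exc
--
--     out: dict[tuple[str, ...], int] = {}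
--     for offset, row in enumerate(sheet_rows):
--         key = tuple(_norm(row[i]) if i < len(row) else "" for i in anchor_indices)
--         if not any(k for k in key):
--             continue
--         if key in out:
--             continue
--         # +1 to convert 0-based enumeration → 1-based sheet row, then add header offset.
--         out[key] = header_row + 1 + offset
--     return out
-- ===== SOURCE B (Python) =====
-- from typing import Sequence
--
--
-- def _norm(value: str) -> str:
--     return (value or "").strip().lower()
--
--
-- def build_anchor_index(
--     sheet_columns: Sequence[str],
--     sheet_rows: Sequence[Sequence[str]],
--     anchor_cols: Sequence[str],
--     header_row: int = 1,
-- ) -> dict[tuple[str, ...], int]: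
--     # Resolve anchor columns through a map of first header positions,
--     # built once (no repeated list.index scans).
--     pos: dict[str, int] = {}
--     for i, name in enumerate(sheet_columns):
--         pos.setdefault(name, i)
--     try:
--         anchor_indices = [pos[col] for col in anchor_cols]
--     except KeyError as exc:
--         raise KeyError(f"Anchor column missing in sheet header: {exc}") from exc
--
--     # Group the 1-based sheet row numbers by anchor key, then keep the
--     # earliest row of each group.
--     groups: dict[tuple[str, ...], list[int]] = {}
--     for rownum, row in enumerate(sheet_rows, start=header_row + 1):
--         key = tuple(_norm(row[i]) if i < len(row) else "" for i in anchor_indices)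
--         if any(key):
--             groups.setdefault(key, []).append(rownum)
--     return {key: min(rows) for key, rows in groups.items()}
-- ===== Notes on version B (the rewrite author's own statement) =====
-- stated objective: alternative
-- what changed: B resolves anchor columns through a first-position header map built once (instead of repeated list.index scans) and replaces A's membership-guarded single-pass dict build by a grouping stage (row numbers collected per anchor key) followed by a per-group minimum, so no key-membership test on the output dict is ever made.
import Mathlib
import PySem

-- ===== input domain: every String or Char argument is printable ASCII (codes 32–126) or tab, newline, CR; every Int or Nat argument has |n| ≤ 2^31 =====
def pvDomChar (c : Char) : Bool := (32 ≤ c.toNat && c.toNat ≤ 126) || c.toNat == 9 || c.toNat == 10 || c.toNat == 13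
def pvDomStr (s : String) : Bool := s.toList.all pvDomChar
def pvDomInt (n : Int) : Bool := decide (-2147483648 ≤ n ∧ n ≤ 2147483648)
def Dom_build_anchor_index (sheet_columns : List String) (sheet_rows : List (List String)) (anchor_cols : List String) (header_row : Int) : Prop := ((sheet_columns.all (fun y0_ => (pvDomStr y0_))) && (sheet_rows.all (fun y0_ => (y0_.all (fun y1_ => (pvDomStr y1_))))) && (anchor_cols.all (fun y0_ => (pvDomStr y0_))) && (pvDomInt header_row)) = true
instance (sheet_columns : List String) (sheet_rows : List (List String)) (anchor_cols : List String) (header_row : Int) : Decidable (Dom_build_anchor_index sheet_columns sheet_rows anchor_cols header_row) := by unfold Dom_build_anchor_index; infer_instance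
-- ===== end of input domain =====

-- B resolves anchor columns through a first-position header map built once and replaces A's
-- membership-guarded dict build by a grouping stage (row numbers per key) followed by a
-- per-group minimum (objective: alternative; equivalence is about the return value).

-- ===== PORT A =====
-- _norm(value) = (value or "").strip().lower()  ("value or ''" is value itself for a str argument)
def pvNorm (s : String) : String := PySem.Str.lower (PySem.Str.strip s)

-- key = tuple(_norm(row[i]) if i < len(row) else "" for i in anchor_indices)
-- (the identical expression occurs in both Python sources; i is a nonnegative int, so pyGetD is exact)
def pvKey (idxs : List Int) (row : List String) : List String :=
  idxs.map (fun i => if i < (row.length : Int) then pvNorm (PySem.List.pyGetD row i "") else "")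

-- any(k for k in key): a str is truthy iff it is nonempty
def pvNonempty (key : List String) : Bool := key.any (fun k => k != "")

def build_anchor_index (sheet_columns : List String) (sheet_rows : List (List String)) (anchor_cols : List String) (header_row : Int) : List (List String × Int) :=
  -- anchor_indices = [sheet_columns.index(col) for col in anchor_cols]; a missing column raises
  -- KeyError in Python (excluded by Pre_); the port returns [] there
  match anchor_cols.mapM (fun c => (PySem.List.index? sheet_columns c).map (fun n => (n : Int))) with
  | none => []
  | some idxs =>
    ((PySem.List.enumerate sheet_rows 0).foldl
      (fun out p =>
        let key := pvKey idxs p.2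
        if pvNonempty key = false then out          -- if not any(k for k in key): continue
        else if out.contains key then out           -- if key in out: continue
        else out.insert key (header_row + 1 + p.1)) -- out[key] = header_row + 1 + offset
      PySem.Dict.empty).items

-- ===== PORT B =====
def build_anchor_index_alt (sheet_columns : List String) (sheet_rows : List (List String)) (anchor_cols : List String) (header_row : Int) : List (List String × Int) :=
  -- pos: first header occurrence of each name (dict.setdefault over enumerate(sheet_columns))
  let pos := (PySem.List.enumerate sheet_columns 0).foldl (fun d p => d.setdefault p.2 p.1) PySem.Dict.empty
  -- anchor_indices = [pos[col] for col in anchor_cols]; KeyError (excluded by Pre_) → port returns []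
  match anchor_cols.mapM (fun c => pos.get? c) with
  | none => []
  | some idxs =>
    -- for rownum, row in enumerate(sheet_rows, start=header_row + 1):
    --   if any(key): groups.setdefault(key, []).append(rownum)
    let groups := (PySem.List.enumerate sheet_rows (header_row + 1)).foldl
      (fun d p =>
        let key := pvKey idxs p.2
        if pvNonempty key then d.modify key [] (fun v => v ++ [p.1]) else d)
      PySem.Dict.empty
    -- {key: min(rows) for key, rows in groups.items()}; every group list is nonempty by
    -- construction, so Python's min never sees an empty list (the .getD 0 branch is unreachable)
    groups.items.map (fun kv => (kv.1, (PySem.List.min? kv.2 (fun x => x)).getD 0))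

-- ===== PRECONDITION & SPEC =====
-- Pre_ excludes exactly the inputs where some anchor column is missing from the header row:
-- there Python A raises KeyError (and Python B raises KeyError as well).
def Pre_build_anchor_index (sheet_columns : List String) (sheet_rows : List (List String)) (anchor_cols : List String) (header_row : Int) : Prop :=
  ∀ c ∈ anchor_cols, c ∈ sheet_columns
instance (sheet_columns : List String) (sheet_rows : List (List String)) (anchor_cols : List String) (header_row : Int) : Decidable (Pre_build_anchor_index sheet_columns sheet_rows anchor_cols header_row) := by unfold Pre_build_anchor_index; infer_instance

def pvWitness_build_anchor_index : List String × List (List String) × List String × Int :=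
  (["id", "name"], [["7", "x"], ["", ""], ["7", "y"]], ["id"], 1)

def Spec_build_anchor_index (sheet_columns : List String) (sheet_rows : List (List String)) (anchor_cols : List String) (header_row : Int) (out : List (List String × Int)) : Prop := out = build_anchor_index_alt sheet_columns sheet_rows anchor_cols header_row
instance (sheet_columns : List String) (sheet_rows : List (List String)) (anchor_cols : List String) (header_row : Int) (out : List (List String × Int)) : Decidable (Spec_build_anchor_index sheet_columns sheet_rows anchor_cols header_row out) := by unfold Spec_build_anchor_index; infer_instance

-- ===== CLAIM (what is proved, stated in full; the proofs are below) =====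
def Claim_equal_build_anchor_index : Prop := ∀ (sheet_columns : List String) (sheet_rows : List (List String)) (anchor_cols : List String) (header_row : Int), Dom_build_anchor_index sheet_columns sheet_rows anchor_cols header_row → Pre_build_anchor_index sheet_columns sheet_rows anchor_cols header_row → Spec_build_anchor_index sheet_columns sheet_rows anchor_cols header_row (build_anchor_index sheet_columns sheet_rows anchor_cols header_row)

-- ===== LEMMAS AND PROOFS =====

-- first-occurrence deduplication by key: the common normal form of both builds
def pvDedupK (l : List (List String × Int)) : List (List String × Int) :=
  match l with
  | [] => []
  | q :: r => q :: pvDedupK (r.filter (fun p => p.1 ≠ q.1))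
termination_by l.length
decreasing_by simpa using Nat.lt_succ_of_le (le_trans (List.length_filter_le _ _) (by simp))

-- first-occurrence deduplication of a key list (the shape of PySem.Set.update [] _)
def pvDedupL (l : List (List String)) : List (List String) :=
  match l with
  | [] => []
  | x :: t => x :: pvDedupL (t.filter (fun y => y ≠ x))
termination_by l.length
decreasing_by simpa using Nat.lt_succ_of_le (le_trans (List.length_filter_le _ _) (by simp))

-- induction principle for pvDedupK's recursion without the attach/unattach noise
theorem pvDedupK_induction (P : List (List String × Int) → Prop)
    (h0 : P [])
    (h1 : ∀ q r, P (r.filter (fun p => p.1 ≠ q.1)) → P (q :: r)) : ∀ l, P l := by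
  have key : ∀ n l, l.length ≤ n → P l := by
    intro n
    induction n with
    | zero =>
      intro l hl
      rw [List.eq_nil_of_length_eq_zero (Nat.le_zero.mp hl)]
      exact h0
    | succ n ih =>
      intro l hl
      cases l with
      | nil => exact h0
      | cons q r =>
        refine h1 q r (ih _ (le_trans (List.length_filter_le _ _) ?_))
        simpa using Nat.lt_succ_iff.mp (Nat.lt_of_lt_of_le (by simp) hl)
  exact fun l => key l.length l le_rfl

theorem pvDedupK_sublist (l : List (List String × Int)) : (pvDedupK l).Sublist l := by
  refine pvDedupK_induction (fun l => (pvDedupK l).Sublist l) (by simp [pvDedupK]) ?_ l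
  intro q r ih
  rw [pvDedupK]
  exact List.Sublist.cons₂ q (ih.trans List.filter_sublist)

theorem pv_mapM_congr {α β : Type} (l : List α) (f g : α → Option β)
    (h : ∀ x ∈ l, f x = g x) : l.mapM f = l.mapM g := by
  induction l with
  | nil => rfl
  | cons a t ih =>
    simp only [List.mapM_cons, h a List.mem_cons_self,
      ih (fun x hx => h x (List.mem_cons_of_mem _ hx))]

-- B's header-position map looks up the same index list.index finds
theorem pv_pos_get (sc : List String) (c : String) (s : Int) (d : PySem.Dict String Int) :
    ((PySem.List.enumerate sc s).foldl (fun d p => d.setdefault p.2 p.1) d).get? c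
      = if d.contains c then d.get? c
        else (PySem.List.index? sc c).map (fun n => s + (n : Int)) := by
  induction sc generalizing s d with
  | nil =>
    rw [PySem.List.enumerate_nil, List.foldl_nil,
        show PySem.List.index? ([] : List String) c = none from by simp]
    by_cases h : d.contains c
    · simp [h]
    · simp [(PySem.Dict.get?_eq_none_iff_contains d c).mpr (Bool.eq_false_iff.mpr h)]
  | cons x xs ih =>
    rw [PySem.List.enumerate_cons, List.foldl_cons, ih]
    by_cases hcx : c = x
    · subst hcx
      rw [PySem.List.index?_cons_self, PySem.Dict.contains_setdefault,
          PySem.Dict.get?_setdefault_self]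
      simp only [beq_self_eq_true, Bool.true_or, if_true]
      cases hg : d.get? c with
      | none =>
        have hc : d.contains c = false := (PySem.Dict.get?_eq_none_iff_contains d c).mp hg
        simp [hc]
      | some v =>
        have hc : d.contains c = true := by
          rcases Bool.eq_false_or_eq_true (d.contains c) with h | h
          · exact h
          · rw [(PySem.Dict.get?_eq_none_iff_contains d c).mpr h] at hg; cases hg
        simp [hc]
    · rw [PySem.Dict.contains_setdefault, PySem.Dict.get?_setdefault_of_ne d s hcx,
          PySem.List.index?_cons_of_ne xs (fun h => hcx h.symm)]
      have hb : (c == x) = false := by simp [hcx]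
      rw [hb, Bool.false_or]
      by_cases h : d.contains c
      · simp [h]
      · simp only [h, Bool.false_eq_true, if_false]
        cases hi : PySem.List.index? xs c <;> simp
        ring

-- A's guarded forward build, from any accumulator, produces accumulator ++ dedup of the fresh keys
theorem pv_foldA (ps : List (List String × Int)) (d : PySem.Dict (List String) Int) :
    (ps.foldl (fun out q => if out.contains q.1 then out else out.insert q.1 q.2) d).items
      = d.items ++ pvDedupK (ps.filter (fun q => !(d.contains q.1))) := by
  induction ps generalizing d with
  | nil => simp [pvDedupK]
  | cons q r ih =>
    simp only [List.foldl_cons, List.filter_cons]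
    by_cases hc : d.contains q.1
    · simp only [hc, if_true, Bool.not_true, Bool.false_eq_true, if_false]
      exact ih d
    · have hc' : d.contains q.1 = false := Bool.eq_false_iff.mpr hc
      simp only [hc', Bool.false_eq_true, if_false, Bool.not_false, if_true]
      rw [ih, PySem.Dict.items_insert_of_not_contains d q.2 hc', pvDedupK]
      simp only [List.append_assoc, List.singleton_append]
      have hfilt : List.filter (fun p => !(d.insert q.1 q.2).contains p.1) r
          = List.filter (fun p => p.1 ≠ q.1) (List.filter (fun p => !d.contains p.1) r) := by
        rw [List.filter_filter]
        apply List.filter_congr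
        intro p _
        rw [PySem.Dict.contains_insert]
        by_cases hpq : p.1 = q.1 <;> simp [hpq]
      rw [hfilt]

-- enumerate from a shifted start
theorem pv_enumerate_shift (l : List (List String)) (a b : Int) :
    PySem.List.enumerate l (a + b) = (PySem.List.enumerate l b).map (fun p => (a + p.1, p.2)) := by
  induction l generalizing b with
  | nil => simp [PySem.List.enumerate_nil]
  | cons x xs ih =>
    rw [PySem.List.enumerate_cons, PySem.List.enumerate_cons, List.map_cons,
        show a + b + 1 = a + (b + 1) by ring, ih]

-- PySem.Set.update from an accumulator is the accumulator followed by first-occurrence dedup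
theorem pv_update_eq_dedup (l : List (List String)) (s : List (List String)) :
    PySem.Set.update s l = s ++ pvDedupL (l.filter (fun x => ¬ x ∈ s)) := by
  induction l generalizing s with
  | nil => simp [PySem.Set.update, pvDedupL]
  | cons x t ih =>
    rw [show PySem.Set.update s (x :: t) = PySem.Set.update (PySem.Set.add s x) t from rfl,
        List.filter_cons]
    by_cases hx : x ∈ s
    · have hd : decide (¬ x ∈ s) = false := by simp [hx]
      rw [show PySem.Set.add s x = s from by simp [PySem.Set.add, hx], hd]
      simp only [Bool.false_eq_true, if_false]
      exact ih s
    · have hd : decide (¬ x ∈ s) = true := by simp [hx]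
      have hfilt : t.filter (fun y => ¬ y ∈ s ++ [x])
          = (t.filter (fun y => ¬ y ∈ s)).filter (fun y => y ≠ x) := by
        rw [List.filter_filter]
        apply List.filter_congr
        intro y _
        by_cases hy : y ∈ s <;> by_cases hyx : y = x <;> simp [hy, hyx]
      rw [show PySem.Set.add s x = s ++ [x] from by simp [PySem.Set.add, hx], hd, if_pos rfl,
          ih (s ++ [x]), hfilt, pvDedupL, List.append_assoc]
      rfl

-- key-lists: first-occurrence dedup of the keys is the key list of pvDedupK
theorem pv_dedupL_map (ps : List (List String × Int)) :
    pvDedupL (ps.map (fun q => q.1)) = (pvDedupK ps).map (fun q => q.1) := by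
  refine pvDedupK_induction
    (fun ps => pvDedupL (ps.map (fun q => q.1)) = (pvDedupK ps).map (fun q => q.1))
    (by simp only [List.map_nil]; simp [pvDedupL, pvDedupK]) ?_ ps
  intro q r ih
  rw [List.map_cons, pvDedupL, pvDedupK, List.map_cons, ← ih, List.filter_map]
  rfl

theorem pv_find?_eq_head?_filter {α : Type} (l : List α) (p : α → Bool) :
    l.find? p = (l.filter p).head? := by
  induction l with
  | nil => rfl
  | cons a t ih =>
    cases h : p a
    · rw [List.find?_cons_of_neg (by simp [h]), List.filter_cons_of_neg (by simp [h]), ih]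
    · rw [List.find?_cons_of_pos h, List.filter_cons_of_pos h, List.head?_cons]

theorem pvDedupK_mem (l : List (List String × Int)) (q : List String × Int) :
    q ∈ pvDedupK l → l.find? (fun r => r.1 == q.1) = some q := by
  refine pvDedupK_induction (fun l => q ∈ pvDedupK l → l.find? (fun r => r.1 == q.1) = some q)
    (by simp [pvDedupK]) ?_ l
  intro x r ih
  rw [pvDedupK]
  intro hmem
  rcases List.mem_cons.mp hmem with rfl | hmem
  · simp
  · have hne : q.1 ≠ x.1 := by
      intro h
      have h2 := List.of_mem_filter ((pvDedupK_sublist _).mem hmem)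
      simp [h] at h2
    have hbeq : (x.1 == q.1) = false := beq_eq_false_iff_ne.mpr (fun h => hne h.symm)
    rw [List.find?_cons, hbeq]
    have := ih hmem
    rw [pv_find?_eq_head?_filter, List.filter_filter] at this
    rw [pv_find?_eq_head?_filter]
    rw [show (fun (p : List String × Int) => p.1 == q.1 && decide (p.1 ≠ x.1))
        = (fun p => p.1 == q.1) from ?_] at this
    · exact this
    · funext p
      by_cases hp : p.1 = q.1 <;> simp [hp, hne]

theorem pv_foldl_min (t : List Int) (x : Int) (h : ∀ y ∈ t, x ≤ y) : t.foldl min x = x := by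
  induction t with
  | nil => rfl
  | cons y r ih =>
    rw [List.foldl_cons, min_eq_left (h y List.mem_cons_self)]
    exact ih (fun z hz => h z (List.mem_cons_of_mem _ hz))

-- the minimum of the group of a key kept by pvDedupK is the value pvDedupK kept
theorem pv_min_group (ps : List (List String × Int)) (kv : List String × Int)
    (hpair : ps.Pairwise (fun a b => a.2 < b.2)) (hmem : kv ∈ pvDedupK ps) :
    (PySem.List.min? ((ps.filter (fun q => q.1 == kv.1)).map (fun q => q.2)) (fun x => x)).getD 0
      = kv.2 := by
  have hf := pvDedupK_mem ps kv hmem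
  rw [pv_find?_eq_head?_filter] at hf
  rcases hF : ps.filter (fun q => q.1 == kv.1) with _ | ⟨a, t⟩
  · rw [hF] at hf; cases hf
  · rw [hF] at hf
    have ha : a = kv := by simpa using hf
    subst ha
    have hpF : (a :: t).Pairwise (fun x y : List String × Int => x.2 < y.2) := by
      rw [← hF]
      exact List.Pairwise.sublist List.filter_sublist hpair
    rw [hF, List.map_cons, PySem.List.min?_id_cons, Option.getD_some]
    refine pv_foldl_min _ _ ?_
    intro y hy
    rcases List.mem_map.mp hy with ⟨p, hp, rfl⟩
    exact le_of_lt ((List.pairwise_cons.mp hpF).1 p hp)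

-- ===== VERDICT (by name: the statement is the Claim_ definition above) =====
theorem build_anchor_index_spec : Claim_equal_build_anchor_index := by
  intro sc sr ac hr _ _
  unfold Spec_build_anchor_index build_anchor_index build_anchor_index_alt
  -- the two anchor-resolution passes agree
  have hres : ∀ c, ((PySem.List.enumerate sc 0).foldl (fun d p => d.setdefault p.2 p.1) PySem.Dict.empty).get? c
      = (PySem.List.index? sc c).map (fun n => (n : Int)) := by
    intro c
    rw [pv_pos_get]
    rw [PySem.Dict.contains_empty, if_neg (by simp)]
    cases PySem.List.index? sc c <;> simp
  have hsc : (ac.mapM (fun c => ((PySem.List.enumerate sc 0).foldl (fun d p => d.setdefault p.2 p.1) PySem.Dict.empty).get? c))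
      = ac.mapM (fun c => (PySem.List.index? sc c).map (fun n => (n : Int))) :=
    pv_mapM_congr _ _ _ (fun c _ => hres c)
  simp only [hsc]
  cases hm : ac.mapM (fun c => (PySem.List.index? sc c).map (fun n => (n : Int))) with
  | none => rfl
  | some idxs =>
    -- the common pair list: (key, 1-based sheet row) of the rows with a nonempty key
    set ps := (((PySem.List.enumerate sr 0).map (fun p => (pvKey idxs p.2, hr + 1 + p.1))).filter
        (fun q => pvNonempty q.1)) with hps
    have hpair : ps.Pairwise (fun a b => a.2 < b.2) := by
      rw [hps]
      refine List.Pairwise.filter _ ?_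
      rw [List.pairwise_map]
      refine (PySem.List.pairwise_lt_enumerate sr 0).imp ?_
      intro a b h
      simpa using h
    -- A's loop is the guarded first-wins fold over ps; its items are pvDedupK ps
    have hA : ((PySem.List.enumerate sr 0).foldl
        (fun out p =>
          if pvNonempty (pvKey idxs p.2) = false then out
          else if out.contains (pvKey idxs p.2) then out
          else out.insert (pvKey idxs p.2) (hr + 1 + p.1)) PySem.Dict.empty).items
        = pvDedupK ps := by
      have hbody : (fun (out : PySem.Dict (List String) Int) (p : Int × List String) =>
            if pvNonempty (pvKey idxs p.2) = false then out
            else if out.contains (pvKey idxs p.2) then out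
            else out.insert (pvKey idxs p.2) (hr + 1 + p.1))
          = (fun out p =>
            (fun (o : PySem.Dict (List String) Int) (q : List String × Int) =>
              if pvNonempty q.1 then (if o.contains q.1 then o else o.insert q.1 q.2) else o)
              out ((fun p : Int × List String => (pvKey idxs p.2, hr + 1 + p.1)) p)) := by
        funext out p
        cases h : pvNonempty (pvKey idxs p.2) <;> simp [h]
      rw [hbody, ← List.foldl_map
            (f := fun p : Int × List String => (pvKey idxs p.2, hr + 1 + p.1))
            (g := fun (o : PySem.Dict (List String) Int) (q : List String × Int) =>
              if pvNonempty q.1 then (if o.contains q.1 then o else o.insert q.1 q.2) else o),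
          PySem.List.foldl_if_eq_foldl_filter (p := fun q : List String × Int => pvNonempty q.1)
            (f := fun (o : PySem.Dict (List String) Int) (q : List String × Int) =>
              if o.contains q.1 then o else o.insert q.1 q.2),
          ← hps, pv_foldA]
      rw [show (PySem.Dict.empty : PySem.Dict (List String) Int).items = [] from rfl,
          List.nil_append]
      congr 1
      simp [PySem.Dict.contains_empty]
    -- B's grouping loop is the modify-append fold over ps
    have hmap : (PySem.List.enumerate sr (hr + 1)).map (fun p : Int × List String => (pvKey idxs p.2, p.1))
        = (PySem.List.enumerate sr 0).map (fun p : Int × List String => (pvKey idxs p.2, hr + 1 + p.1)) := by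
      have h0 := pv_enumerate_shift sr (hr + 1) 0
      rw [add_zero] at h0
      rw [h0, List.map_map]
      rfl
    have hB : ((PySem.List.enumerate sr (hr + 1)).foldl
        (fun d p =>
          if pvNonempty (pvKey idxs p.2) then d.modify (pvKey idxs p.2) [] (fun v => v ++ [p.1]) else d)
        PySem.Dict.empty)
        = ps.foldl (fun d q => d.modify q.1 [] (fun v => v ++ [q.2])) PySem.Dict.empty := by
      rw [show (fun (d : PySem.Dict (List String) (List Int)) (p : Int × List String) =>
            if pvNonempty (pvKey idxs p.2) then d.modify (pvKey idxs p.2) [] (fun v => v ++ [p.1]) else d)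
          = (fun d p =>
            (fun (o : PySem.Dict (List String) (List Int)) (q : List String × Int) =>
              if pvNonempty q.1 then o.modify q.1 [] (fun v => v ++ [q.2]) else o)
              d ((fun p : Int × List String => (pvKey idxs p.2, p.1)) p)) from rfl,
          ← List.foldl_map
            (f := fun p : Int × List String => (pvKey idxs p.2, p.1))
            (g := fun (o : PySem.Dict (List String) (List Int)) (q : List String × Int) =>
              if pvNonempty q.1 then o.modify q.1 [] (fun v => v ++ [q.2]) else o),
          PySem.List.foldl_if_eq_foldl_filter (p := fun q : List String × Int => pvNonempty q.1)
            (f := fun (o : PySem.Dict (List String) (List Int)) (q : List String × Int) =>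
              o.modify q.1 [] (fun v => v ++ [q.2])),
          hmap, ← hps]
    set G := ps.foldl (fun d q => d.modify q.1 [] (fun v => v ++ [q.2])) PySem.Dict.empty with hGdef
    -- G's keys are the first occurrences of the keys of ps, in order, without repetition
    have hkeys : G.keys = (pvDedupK ps).map (fun q => q.1) := by
      rw [hGdef, PySem.Dict.keys_foldl_modify_key ps (fun q => q.1) [] (fun d q => fun v => v ++ [q.2])
            PySem.Dict.empty,
          PySem.Dict.keys_empty,
          pv_update_eq_dedup, List.nil_append, ← pv_dedupL_map]
      congr 1
      simp
    have hnodup : G.keys.Nodup := by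
      rw [hGdef]
      exact PySem.Dict.nodup_keys_foldl_modify_key ps (fun q => q.1) [] (fun d q => fun v => v ++ [q.2])
        PySem.Dict.empty (by rw [PySem.Dict.keys_empty]; exact List.nodup_nil)
    -- each group is the list of row numbers of that key, in sheet order
    have hgetD : ∀ k, G.getD k [] = (ps.filter (fun q => q.1 == k)).map (fun q => q.2) := by
      intro k
      rw [hGdef, PySem.Dict.getD_foldl_modify_append]
      simp
    have hitems : G.items = G.keys.map (fun k => (k, G.getD k [])) :=
      PySem.Dict.items_eq_map_keys G hnodup []
    have hmin : G.items.map (fun kv => (kv.1, (PySem.List.min? kv.2 (fun x => x)).getD 0))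
        = pvDedupK ps := by
      rw [hitems, hkeys, List.map_map, List.map_map]
      conv_rhs => rw [show pvDedupK ps = (pvDedupK ps).map id from (List.map_id _).symm]
      apply List.map_congr_left
      intro kv hkv
      simp only [id, Function.comp]
      rw [hgetD kv.1, pv_min_group ps kv hpair hkv]
    simp only [hA, hB, hmin]
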